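-- pv_equiv track=rewrite | github.com/KhoiBui16/28Tech_Code_Online | Python/Source Code Python Contest/Contest_03_HamVaLyThuyetSo/Bai29_SoThuanNghich_SoLocPhat.py | is_beautiful_num
-- ===== SOURCE A (Python) =====
-- def is_beautiful_num(n):
--     sum = 0
--     check = False
--     temp = n
--     rev = 0
--     while temp != 0:
--         digit = temp % 10
--         sum += digit
--         if digit == 6:
--             check = True
--         rev = rev * 10 + digit
--         temp //= 10
--     return check and (rev == n) and (sum % 10 == 8)
-- ===== SOURCE B (Python) =====
-- def is_beautiful_num(n):
--     s = str(n)
--     return '6' in s and s == s[::-1] and sum(int(c) for c in s) % 10 == 8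
-- ===== Notes on version B (the rewrite author's own statement) =====
-- stated objective: idiomatic
-- what changed: Replaced the arithmetic digit-extraction while loop (running sum, digit-6 flag, reversed-number accumulator) by a single string-based expression: '6' in str(n), palindrome test s == s[::-1], and digit-sum via sum(int(c) for c in s).
import Mathlib
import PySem

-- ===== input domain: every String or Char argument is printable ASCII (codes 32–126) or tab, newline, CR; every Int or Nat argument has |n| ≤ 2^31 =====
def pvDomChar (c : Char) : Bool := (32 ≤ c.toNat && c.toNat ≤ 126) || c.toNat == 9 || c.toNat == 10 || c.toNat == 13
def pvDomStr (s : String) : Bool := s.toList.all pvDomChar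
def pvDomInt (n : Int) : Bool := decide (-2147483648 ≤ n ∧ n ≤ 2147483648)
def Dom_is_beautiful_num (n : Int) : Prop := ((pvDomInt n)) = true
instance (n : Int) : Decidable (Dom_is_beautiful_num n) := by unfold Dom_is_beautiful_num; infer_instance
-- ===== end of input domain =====

-- B replaces A's arithmetic digit-extraction loop by a string-based check on str(n); equivalence is
-- proved on 0 ≤ n (on n < 0 A's while loop never terminates).

-- ===== PORT A =====
-- A's while loop; state (check, sum, rev). Python's loop never terminates for temp < 0
-- (temp //= 10 stalls at -1), so the `temp ≤ 0` guard only serves totality outside Pre_.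
def isBeautifulLoop (temp sum rev : Int) (check : Bool) : Bool × Int × Int :=
  if h : temp ≤ 0 then (check, sum, rev)
  else
    let digit := PySem.Int.mod temp 10
    isBeautifulLoop (PySem.Int.floordiv temp 10) (sum + digit) (rev * 10 + digit)
      (if digit == 6 then true else check)
  termination_by temp.toNat
  decreasing_by
    simp only [PySem.Int.floordiv, Int.fdiv_eq_ediv]
    omega

def is_beautiful_num (n : Int) : Bool :=
  let r := isBeautifulLoop n 0 0 false
  r.1 && (r.2.2 == n) && (PySem.Int.mod r.2.1 10 == 8)

-- ===== PORT B =====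
-- int(c): exact for the decimal-digit characters of str(n) with n ≥ 0; the `.getD 0` default is
-- never reached there ('-' only occurs for n < 0, outside Pre_, where the Python raises ValueError).
def pvDigitVal (c : Char) : Int := (PySem.Int.ofChars? [c]).getD 0

def is_beautiful_num_alt (n : Int) : Bool :=
  let s := PySem.Int.toChars n
  s.contains '6' && (s == s.reverse) &&
    (PySem.Int.mod (s.foldl (fun acc c => acc + pvDigitVal c) 0) 10 == 8)

-- ===== PRECONDITION & SPEC =====
-- Pre_ excludes n < 0: there A's `while temp != 0` with `temp //= 10` never terminates
-- (temp stays at -1), so A returns on exactly the inputs 0 ≤ n.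
def Pre_is_beautiful_num (n : Int) : Prop := 0 ≤ n
instance (n : Int) : Decidable (Pre_is_beautiful_num n) := by unfold Pre_is_beautiful_num; infer_instance
def pvWitness_is_beautiful_num : Int := (6886)

def Spec_is_beautiful_num (n : Int) (out : Bool) : Prop := out = is_beautiful_num_alt n
instance (n : Int) (out : Bool) : Decidable (Spec_is_beautiful_num n out) := by unfold Spec_is_beautiful_num; infer_instance

-- ===== CLAIM (what is proved, stated in full; the proofs are below) =====
def Claim_equal_is_beautiful_num : Prop := ∀ (n : Int), Dom_is_beautiful_num n → Pre_is_beautiful_num n → Spec_is_beautiful_num n (is_beautiful_num n)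

-- ===== LEMMAS AND PROOFS =====

lemma pv_mod_cast (m : Nat) : PySem.Int.mod (m : Int) 10 = ((m % 10 : Nat) : Int) := by
  simp [PySem.Int.mod, Int.fmod_eq_emod]

lemma pv_floordiv_cast (m : Nat) : PySem.Int.floordiv (m : Int) 10 = ((m / 10 : Nat) : Int) := by
  simp [PySem.Int.floordiv, Int.fdiv_eq_ediv]

-- closed form of A's loop over the digits (LSB-first) of a nonnegative input
lemma pv_loop_eq (m : Nat) (sum rev : Int) (check : Bool) :
    isBeautifulLoop (m : Int) sum rev check =
      (check || decide (6 ∈ Nat.digits 10 m),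
       sum + ((Nat.digits 10 m).sum : Int),
       rev * 10 ^ (Nat.digits 10 m).length + ((Nat.ofDigits 10 (Nat.digits 10 m).reverse : Nat) : Int)) := by
  induction m using Nat.strong_induction_on generalizing sum rev check with
  | _ m ih =>
    rcases Nat.eq_zero_or_pos m with h0 | hpos
    · subst h0
      rw [isBeautifulLoop]
      simp
    · rw [isBeautifulLoop]
      have hneg : ¬ ((m : Int) ≤ 0) := by exact_mod_cast Nat.not_le.mpr hpos
      rw [dif_neg hneg]
      simp only [pv_mod_cast, pv_floordiv_cast,
        ih (m / 10) (Nat.div_lt_self hpos (by norm_num))]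
      rw [Nat.digits_def' (by norm_num : (1:Nat) < 10) hpos]
      simp only [Prod.mk.injEq]
      refine ⟨?_, ?_, ?_⟩
      · by_cases h6 : m % 10 = 6
        · have hb : (((m % 10 : Nat) : Int) == 6) = true := by norm_num [h6]
          simp [h6]
        · have hi : ¬ ((m : Int) % 10 = 6) := by omega
          have h6' : ¬ (6 = m % 10) := fun h => h6 h.symm
          simp [hi, h6']
      · simp only [List.sum_cons]
        push_cast
        ring
      · rw [List.reverse_cons, Nat.ofDigits_append, Nat.ofDigits_singleton]
        push_cast [List.length_reverse, List.length_cons]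
        ring

-- characterization of Nat.toDigitsCore with enough fuel
lemma pv_toDigitsCore_eq (n : Nat) : ∀ (fuel : Nat) (acc : List Char), n < fuel →
    Nat.toDigitsCore 10 fuel n acc =
      (if n = 0 then ['0'] else ((Nat.digits 10 n).map Nat.digitChar).reverse) ++ acc := by
  induction n using Nat.strong_induction_on with
  | _ n ih =>
    intro fuel acc hf
    obtain ⟨f, rfl⟩ : ∃ f, fuel = f + 1 := ⟨fuel - 1, by omega⟩
    by_cases h0 : n / 10 = 0
    · have hn10 : n < 10 := by omega
      rcases Nat.eq_zero_or_pos n with rfl | hp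
      · norm_num [Nat.toDigitsCore, Nat.digitChar]
      · have hd : Nat.digits 10 n = [n] := by
          rw [Nat.digits_def' (by norm_num : (1:Nat) < 10) hp]
          simp [Nat.mod_eq_of_lt hn10, h0]
        simp [Nat.toDigitsCore, h0, hd, Nat.mod_eq_of_lt hn10, hp.ne']
    · have hrec := ih (n / 10) (Nat.div_lt_self (by omega) (by norm_num)) f
        (Nat.digitChar (n % 10) :: acc) (by omega)
      have hstep : Nat.toDigitsCore 10 (f + 1) n acc
          = Nat.toDigitsCore 10 f (n / 10) (Nat.digitChar (n % 10) :: acc) := by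
        simp [Nat.toDigitsCore, h0]
      rw [hstep, hrec, if_neg h0, if_neg (by omega : ¬ n = 0),
        Nat.digits_def' (by norm_num : (1:Nat) < 10) (by omega : 0 < n)]
      simp

lemma pv_toChars_eq (m : Nat) :
    PySem.Int.toChars (m : Int) =
      if m = 0 then ['0'] else ((Nat.digits 10 m).map Nat.digitChar).reverse := by
  have h1 : ¬ ((m : Int) < 0) := by omega
  simp only [PySem.Int.toChars, if_neg h1, Int.toNat_natCast, Nat.toDigits]
  rw [pv_toDigitsCore_eq m (m + 1) [] (by omega)]
  simp

lemma pv_dc_inj {d₁ d₂ : Nat} (h₁ : d₁ < 10) (h₂ : d₂ < 10)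
    (h : Nat.digitChar d₁ = Nat.digitChar d₂) : d₁ = d₂ := by
  revert h; interval_cases d₁ <;> interval_cases d₂ <;> decide

lemma pv_dc_six {d : Nat} (h : d < 10) : Nat.digitChar d = '6' ↔ d = 6 := by
  interval_cases d <;> decide

lemma pv_val_dc {d : Nat} (h : d < 10) : pvDigitVal (Nat.digitChar d) = (d : Int) := by
  interval_cases d <;> decide

-- digitChar is injective on digit lists
lemma pv_map_dc_inj {l₁ l₂ : List Nat} (h₁ : ∀ d ∈ l₁, d < 10) (h₂ : ∀ d ∈ l₂, d < 10)
    (h : l₁.map Nat.digitChar = l₂.map Nat.digitChar) : l₁ = l₂ := by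
  induction l₁ generalizing l₂ with
  | nil => cases l₂ <;> simp_all
  | cons a t ihx =>
    cases l₂ with
    | nil => simp_all
    | cons b u =>
      simp only [List.map_cons, List.cons.injEq] at h
      have ha := pv_dc_inj (h₁ a (by simp)) (h₂ b (by simp)) h.1
      have ht := ihx (fun d hd => h₁ d (by simp [hd])) (fun d hd => h₂ d (by simp [hd])) h.2
      simp [ha, ht]

-- palindromic value iff palindromic digit list
lemma pv_pal_iff {m : Nat} (hm : m ≠ 0) :
    (Nat.ofDigits 10 (Nat.digits 10 m).reverse : Nat) = m ↔
      (Nat.digits 10 m).reverse = Nat.digits 10 m := by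
  constructor
  · intro h
    have hne : Nat.digits 10 m ≠ [] := Nat.digits_ne_nil_iff_ne_zero.mpr hm
    have hrne : (Nat.digits 10 m).reverse ≠ [] := by simp [hne]
    have hdig : ∀ d ∈ (Nat.digits 10 m).reverse, d < 10 := fun d hd =>
      Nat.digits_lt_base (by norm_num) (List.mem_reverse.mp hd)
    by_cases hlast : (Nat.digits 10 m).reverse.getLast hrne = 0
    · exfalso
      have hsplit := List.dropLast_append_getLast hrne
      have heq : (Nat.ofDigits 10 (Nat.digits 10 m).reverse : Nat)
          = Nat.ofDigits 10 (Nat.digits 10 m).reverse.dropLast := by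
        conv_lhs => rw [← hsplit]
        rw [Nat.ofDigits_append, hlast]
        simp [Nat.ofDigits_singleton]
      have hlt : (Nat.ofDigits 10 (Nat.digits 10 m).reverse.dropLast : Nat)
          < 10 ^ (Nat.digits 10 m).reverse.dropLast.length :=
        Nat.ofDigits_lt_base_pow_length (by norm_num)
          (fun x hx => hdig x (List.mem_of_mem_dropLast hx))
      have hmlt : m < 10 ^ ((Nat.digits 10 m).length - 1) := by
        have hlen : (Nat.digits 10 m).reverse.dropLast.length = (Nat.digits 10 m).length - 1 := by
          simp
        calc m = Nat.ofDigits 10 (Nat.digits 10 m).reverse := h.symm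
          _ = Nat.ofDigits 10 (Nat.digits 10 m).reverse.dropLast := heq
          _ < 10 ^ ((Nat.digits 10 m).length - 1) := hlen ▸ hlt
      have hle := (Nat.digits_length_le_iff (by norm_num) m).mpr hmlt
      have : (Nat.digits 10 m).length ≠ 0 := by simp [hne]
      omega
    · have hdm := Nat.digits_ofDigits 10 (by norm_num) (Nat.digits 10 m).reverse hdig
        (fun _ => hlast)
      rw [h] at hdm
      exact hdm.symm
  · intro h
    rw [h, Nat.ofDigits_digits]

-- closed form of B on a positive input, over the same digit list
lemma pv_alt_eq (m : Nat) (hm : m ≠ 0) :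
    is_beautiful_num_alt (m : Int) =
      (decide (6 ∈ Nat.digits 10 m) && decide ((Nat.digits 10 m).reverse = Nat.digits 10 m)
        && (PySem.Int.mod ((Nat.digits 10 m).sum : Int) 10 == 8)) := by
  have hdig : ∀ d ∈ Nat.digits 10 m, d < 10 := fun d hd =>
    Nat.digits_lt_base (by norm_num) hd
  unfold is_beautiful_num_alt
  rw [pv_toChars_eq m, if_neg hm]
  have h1 : ((Nat.digits 10 m).map Nat.digitChar).reverse.contains '6'
      = decide (6 ∈ Nat.digits 10 m) := by
    have hiff : ('6' ∈ ((Nat.digits 10 m).map Nat.digitChar).reverse) ↔ 6 ∈ Nat.digits 10 m := by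
      simp only [List.mem_reverse, List.mem_map]
      constructor
      · rintro ⟨d, hd, hdc⟩
        exact ((pv_dc_six (hdig d hd)).mp hdc) ▸ hd
      · intro h6
        exact ⟨6, h6, rfl⟩
    by_cases hc : 6 ∈ Nat.digits 10 m
    · simp [hc, hiff.mpr hc]
    · simp [hc]
      exact fun d hd heq => hc (((pv_dc_six (hdig d hd)).mp heq) ▸ hd)
  have h2 : (((Nat.digits 10 m).map Nat.digitChar).reverse
        == ((Nat.digits 10 m).map Nat.digitChar))
      = decide ((Nat.digits 10 m).reverse = Nat.digits 10 m) := by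
    have hiff : (((Nat.digits 10 m).map Nat.digitChar).reverse
          = ((Nat.digits 10 m).map Nat.digitChar))
        ↔ ((Nat.digits 10 m).reverse = Nat.digits 10 m) := by
      rw [← List.map_reverse]
      constructor
      · intro h
        exact pv_map_dc_inj (fun d hd => hdig d (List.mem_reverse.mp hd)) hdig h
      · intro h
        rw [h]
    by_cases hc : (Nat.digits 10 m).reverse = Nat.digits 10 m
    · simp [hiff.mpr hc, hc]
    · simp only [hc, decide_false]
      exact beq_eq_false_iff_ne.mpr (fun h => hc (hiff.mp h))
  have h3 : (((Nat.digits 10 m).map Nat.digitChar).reverse.foldl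
        (fun acc c => acc + pvDigitVal c) 0)
      = ((Nat.digits 10 m).sum : Int) := by
    rw [PySem.List.foldl_add, List.map_reverse, List.map_map, List.sum_reverse]
    simp only [Function.comp_def]
    rw [List.map_congr_left (fun d hd => pv_val_dc (hdig d hd))]
    rw [Nat.cast_list_sum]
    simp
  simp only [List.reverse_reverse, h1, h2, h3]

-- ===== VERDICT (by name: the statement is the Claim_ definition above) =====
theorem is_beautiful_num_spec : Claim_equal_is_beautiful_num := by
  intro n _ hpre
  unfold Spec_is_beautiful_num
  obtain ⟨m, rfl⟩ := Int.eq_ofNat_of_zero_le hpre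
  rcases Nat.eq_zero_or_pos m with rfl | hpos
  · have hA : is_beautiful_num ((0 : Nat) : Int) = false := by
      rw [is_beautiful_num, isBeautifulLoop]
      simp
    have hB : is_beautiful_num_alt ((0 : Nat) : Int) = false := by
      rw [is_beautiful_num_alt, pv_toChars_eq 0]
      simp
    rw [hA, hB]
  · rw [pv_alt_eq m hpos.ne']
    rw [is_beautiful_num, pv_loop_eq]
    simp only [Bool.false_or, zero_add, zero_mul]
    have hmid : ((((Nat.ofDigits 10 (Nat.digits 10 m).reverse : Nat)) : Int) == ((m : Nat) : Int))
        = decide ((Nat.digits 10 m).reverse = Nat.digits 10 m) := by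
      by_cases hc : (Nat.ofDigits 10 (Nat.digits 10 m).reverse : Nat) = m
      · have hr := (pv_pal_iff hpos.ne').mp hc
        simp [hr, Nat.ofDigits_digits]
      · have h2 := fun hr => hc ((pv_pal_iff hpos.ne').mpr hr)
        have hb : (((Nat.ofDigits 10 (Nat.digits 10 m).reverse : Nat) : Int) == ((m : Nat) : Int))
            = false := beq_eq_false_iff_ne.mpr (by exact_mod_cast hc)
        simp only [hb]
        exact (decide_eq_false h2).symm
    rw [hmid]
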